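-- pv_equiv track=rewrite | github.com/WIPACrepo/iceprod | iceprod/core/parser.py | scanner
-- ===== SOURCE A (Python) =====
-- def scanner(data):
--     """A lexical scanner, yielding token pairs"""
--     word = ''
--     escape = False
--     for ch in data:
--         if escape:
--             word += ch
--             escape = False
--         elif ch == '\\':
--             escape = True
--         elif ch in '$()[]':
--             if word:
--                 yield ('word', word)
--                 word = ''
--             if ch == '$':
--                 yield ('starter', '$')
--             elif ch == '(':
--                 yield ('scopeL', '(')
--             elif ch == ')':
--                 yield ('scopeR', ')')
--             elif ch == '[':
--                 yield ('bracketL', '[')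
--             elif ch == ']':
--                 yield ('bracketR', ']')
--         else:
--             word += ch
--     if word:
--         yield ('word', word)
-- ===== SOURCE B (Python) =====
-- def scanner(data):
--     """A lexical scanner, yielding token pairs (span-based re-implementation)"""
--     labels = {'$': 'starter', '(': 'scopeL', ')': 'scopeR', '[': 'bracketL', ']': 'bracketR'}
--     i, n = 0, len(data)
--     while i < n:
--         ch = data[i]
--         if ch in labels:
--             yield (labels[ch], ch)
--             i += 1
--         else:
--             parts = []
--             while i < n and data[i] not in labels:
--                 if data[i] == '\\':
--                     if i + 1 < n:
--                         parts.append(data[i + 1])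
--                     i += 2
--                 else:
--                     parts.append(data[i])
--                     i += 1
--             if parts:
--                 yield ('word', ''.join(parts))
-- ===== Notes on version B (the rewrite author's own statement) =====
-- stated objective: alternative
-- what changed: Replaces the character-by-character state machine (word accumulator + escape flag) with a span-based tokenizer: an outer loop over tokens that emits each special char directly and an inner run-collector that grabs a maximal word run, resolving backslash escapes by consuming two characters at a time.
import Mathlib
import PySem

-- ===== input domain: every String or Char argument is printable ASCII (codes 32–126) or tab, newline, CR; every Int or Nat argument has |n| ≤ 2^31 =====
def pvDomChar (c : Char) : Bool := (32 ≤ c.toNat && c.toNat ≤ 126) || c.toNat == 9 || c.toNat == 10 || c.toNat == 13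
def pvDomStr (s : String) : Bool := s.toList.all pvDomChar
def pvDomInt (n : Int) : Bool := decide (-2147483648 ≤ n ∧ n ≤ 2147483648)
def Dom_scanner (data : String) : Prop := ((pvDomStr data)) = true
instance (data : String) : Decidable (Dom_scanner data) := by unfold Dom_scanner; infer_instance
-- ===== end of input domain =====

-- B replaces A's char-by-char state machine with a span-based tokenizer (alternative decomposition, same cost).
-- Both ports return the list of yielded token pairs, in order; the Python generators have no side effects.

-- ===== PORT A =====
-- A's `if ch == '$': yield ('starter','$') elif …` chain; yields are collected into a list.
def pvLabelA (c : Char) : List (String × String) :=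
  if c = '$' then [("starter", "$")]
  else if c = '(' then [("scopeL", "(")]
  else if c = ')' then [("scopeR", ")")]
  else if c = '[' then [("bracketL", "[")]
  else if c = ']' then [("bracketR", "]")]
  else []

-- A's for-loop as structural recursion over the characters; `word` is A's accumulator,
-- kept as a List Char (A's `word += ch` is `word ++ [ch]`), made a String exactly where A yields it.
def pvScanA (word : List Char) (escape : Bool) : List Char → List (String × String)
  | [] => if word = [] then [] else [("word", String.mk word)]
  | ch :: rest =>
    if escape then pvScanA (word ++ [ch]) false rest
    else if ch = '\\' then pvScanA word true rest
    else if ['$', '(', ')', '[', ']'].contains ch then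
      (if word = [] then [] else [("word", String.mk word)]) ++ pvLabelA ch ++ pvScanA [] false rest
    else pvScanA (word ++ [ch]) false rest

def scanner (data : String) : List (String × String) := pvScanA [] false data.toList

-- ===== PORT B =====
-- B's `labels` dict (insertion order; lookup = first matching key).
def pvLabels : List (Char × String) :=
  [('$', "starter"), ('(', "scopeL"), (')', "scopeR"), ('[', "bracketL"), (']', "bracketR")]

-- B's inner while-loop: collect a maximal word run, returning (collected chars, remaining input).
-- A backslash consumes two characters (the escaped char joins the run); a trailing lone backslash is dropped.
def pvWordRun : List Char → List Char × List Char
  | [] => ([], [])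
  | c :: rest =>
    if (List.lookup c pvLabels).isSome then ([], c :: rest)
    else if c = '\\' then
      match rest with
      | [] => ([], [])
      | c' :: rest' => let (w, r) := pvWordRun rest'; (c' :: w, r)
    else
      let (w, r) := pvWordRun rest; (c :: w, r)

-- needed by pvScanB's termination proof: the run-collector never returns more input than it was given
theorem pvWordRun_len : ∀ l : List Char, (pvWordRun l).2.length ≤ l.length := by
  intro l
  induction l using pvWordRun.induct with
  | case1 => simp [pvWordRun]
  | case2 c rest h => rw [pvWordRun.eq_def]; simp [h]
  | case3 h => rw [pvWordRun.eq_def]; simp [h]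
  | case4 c' rest' w r hx h ih =>
      rw [pvWordRun.eq_def]; simp only [if_neg h, hx]
      simp [hx] at ih
      simp
      omega
  | case5 c rest h hc w r hx ih =>
      rw [pvWordRun.eq_def]; simp only [if_neg h, if_neg hc, hx]
      simp [hx] at ih
      simp
      omega

-- needed by pvScanB's termination proof: on a non-special head it consumes at least one character
theorem pvWordRun_lt (c : Char) (rest : List Char) (h : List.lookup c pvLabels = none) :
    (pvWordRun (c :: rest)).2.length < (c :: rest).length := by
  rw [pvWordRun.eq_def]
  simp only [h, Option.isSome_none, Bool.false_eq_true, if_false]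
  split
  · cases rest with
    | nil => simp
    | cons c' rest' =>
        have hlen := pvWordRun_len rest'
        cases hx : pvWordRun rest' with
        | mk w r => simp [hx] at hlen ⊢; omega
  · have hlen := pvWordRun_len rest
    cases hx : pvWordRun rest with
    | mk w r => simp [hx] at hlen ⊢; omega

-- B's outer while-loop over tokens (`labels[ch]` is the dict lookup, total because `ch in labels`).
def pvScanB : List Char → List (String × String)
  | [] => []
  | c :: rest =>
    if h : (List.lookup c pvLabels).isSome then
      ((List.lookup c pvLabels).get h, String.mk [c]) :: pvScanB rest
    else
      let p := pvWordRun (c :: rest)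
      (if p.1 = [] then [] else [("word", String.mk p.1)]) ++ pvScanB p.2
termination_by l => l.length
decreasing_by
  · simp
  · exact pvWordRun_lt c rest (Option.not_isSome_iff_eq_none.mp h)

def scanner_alt (data : String) : List (String × String) := pvScanB data.toList

-- ===== PRECONDITION & SPEC =====
def Spec_scanner (data : String) (out : List (String × String)) : Prop := out = scanner_alt data
instance (data : String) (out : List (String × String)) : Decidable (Spec_scanner data out) := by unfold Spec_scanner; infer_instance

-- ===== CLAIM (what is proved, stated in full; the proofs are below) =====
def Claim_equal_scanner : Prop := ∀ (data : String), Dom_scanner data → Spec_scanner data (scanner data)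

-- ===== LEMMAS AND PROOFS =====

-- pvWordRun on a special head: consumes nothing.
theorem pvWordRun_spec (c : Char) (rest : List Char) (h : (List.lookup c pvLabels).isSome) :
    pvWordRun (c :: rest) = ([], c :: rest) := by
  rw [pvWordRun.eq_def]; simp [h]

-- pvWordRun on a lone trailing backslash: the backslash is dropped.
theorem pvWordRun_bs_nil : pvWordRun ['\\'] = ([], []) := by decide

-- pvWordRun on a backslash escape: the escaped char joins the run.
theorem pvWordRun_bs (c' : Char) (rest' : List Char) :
    pvWordRun ('\\' :: c' :: rest') = (c' :: (pvWordRun rest').1, (pvWordRun rest').2) := by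
  have hbs : List.lookup '\\' pvLabels = none := by decide
  rw [pvWordRun.eq_def]
  cases hx : pvWordRun rest' with
  | mk w r => simp [hbs, hx]

-- pvWordRun on an ordinary char: it joins the run.
theorem pvWordRun_ord (c : Char) (rest : List Char)
    (h1 : List.lookup c pvLabels = none) (h2 : ¬ c = '\\') :
    pvWordRun (c :: rest) = (c :: (pvWordRun rest).1, (pvWordRun rest).2) := by
  rw [pvWordRun.eq_def]
  cases hx : pvWordRun rest with
  | mk w r => simp [h1, h2, hx]

-- pvScanB re-expressed through its own word-run splitter (definitional on each branch).
theorem pvScanB_unfold (l : List Char) :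
    pvScanB l =
      (if (pvWordRun l).1 = [] then [] else [("word", String.mk (pvWordRun l).1)]) ++
        pvScanB (pvWordRun l).2 := by
  cases l with
  | nil => simp [pvScanB, pvWordRun]
  | cons c rest =>
    by_cases h : (List.lookup c pvLabels).isSome
    · rw [pvWordRun_spec c rest h]
      simp
    · rw [pvScanB.eq_def]
      simp [h]

-- Main invariant: running A's state machine with pending word `word` (escape clear) over `l`
-- yields the word token for `word` extended by the next maximal run, then B's tokens of the rest.
theorem pvMain : ∀ (n : Nat) (l : List Char) (word : List Char), l.length ≤ n →
    pvScanA word false l =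
      (if word ++ (pvWordRun l).1 = [] then []
       else [("word", String.mk (word ++ (pvWordRun l).1))]) ++
        pvScanB (pvWordRun l).2 := by
  intro n
  induction n with
  | zero =>
    intro l word hl
    cases l with
    | nil => simp [pvScanA, pvWordRun, pvScanB]
    | cons c rest => simp at hl
  | succ n ih =>
    intro l word hl
    cases l with
    | nil => simp [pvScanA, pvWordRun, pvScanB]
    | cons c rest =>
      simp only [List.length_cons, Nat.add_le_add_iff_right] at hl
      by_cases hb : c = '\\'
      · subst hb
        cases rest with
        | nil =>
            rw [pvWordRun_bs_nil]
            simp [pvScanA, pvScanB]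
        | cons c' rest' =>
            have h1 : pvScanA word false ('\\' :: c' :: rest') =
                pvScanA (word ++ [c']) false rest' := by
              simp [pvScanA]
            have h2 : rest'.length ≤ n := by simp at hl; omega
            rw [h1, ih rest' (word ++ [c']) h2, pvWordRun_bs]
            simp [List.append_assoc]
      · by_cases hc : c = '$' ∨ c = '(' ∨ c = ')' ∨ c = '[' ∨ c = ']'
        · have hstep : pvScanA word false (c :: rest) =
              (if word = [] then [] else [("word", String.mk word)]) ++ pvLabelA c ++
                pvScanA [] false rest := by
            rcases hc with h|h|h|h|h <;> subst h <;> simp [pvScanA]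
          have hsome : (List.lookup c pvLabels).isSome := by
            rcases hc with h|h|h|h|h <;> subst h <;> decide
          have hB : pvScanB (c :: rest) = pvLabelA c ++ pvScanB rest := by
            rw [pvScanB.eq_def]
            rcases hc with h|h|h|h|h <;> subst h <;> rfl
          rw [hstep, ih rest [] hl]
          simp only [List.nil_append]
          rw [← pvScanB_unfold rest, pvWordRun_spec c rest hsome, hB]
          simp
        · rw [not_or, not_or, not_or, not_or] at hc
          obtain ⟨h1, h2, h3, h4, h5⟩ := hc
          have hcon : (['$', '(', ')', '[', ']'].contains c) = false := by
            simp [h1, h2, h3, h4, h5]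
          have hlk : List.lookup c pvLabels = none := by
            have b1 : (c == '$') = false := beq_eq_false_iff_ne.mpr h1
            have b2 : (c == '(') = false := beq_eq_false_iff_ne.mpr h2
            have b3 : (c == ')') = false := beq_eq_false_iff_ne.mpr h3
            have b4 : (c == '[') = false := beq_eq_false_iff_ne.mpr h4
            have b5 : (c == ']') = false := beq_eq_false_iff_ne.mpr h5
            simp [pvLabels, List.lookup, b1, b2, b3, b4, b5]
          have hstep : pvScanA word false (c :: rest) = pvScanA (word ++ [c]) false rest := by
            simp [pvScanA, hb, h1, h2, h3, h4, h5]
          rw [hstep, ih rest (word ++ [c]) hl, pvWordRun_ord c rest hlk hb]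
          simp [List.append_assoc]

-- ===== VERDICT (by name: the statement is the Claim_ definition above) =====
theorem scanner_spec : Claim_equal_scanner := by
  intro data _
  unfold Spec_scanner scanner scanner_alt
  rw [pvMain data.toList.length data.toList [] (le_refl _)]
  simp only [List.nil_append]
  rw [← pvScanB_unfold]
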